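-- pv_equiv track=rewrite | github.com/jazzhands35/talos | src/talos/ui/tree_screen.py | _aggregate_state
-- ===== SOURCE A (Python) =====
-- def _aggregate_state(sub_states: list[str]) -> str:
--     """Combine child states into a parent state.
--
--     All children checked -> checked.
--     Any child checked/partial -> partial.
--     Otherwise -> empty.
--     """
--     if not sub_states:
--         return "empty"
--     if all(s == "checked" for s in sub_states):
--         return "checked"
--     if any(s in ("checked", "partial") for s in sub_states):
--         return "partial"
--     return "empty"
-- ===== SOURCE B (Python) =====
-- def _classify(s: str) -> str:
--     """Local state of a single child."""
--     return s if s in ("checked", "partial") else "empty"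
--
--
-- def _join(x: str, y: str) -> str:
--     """Semilattice join of two aggregate states: equal states keep, mixed -> partial."""
--     return x if x == y else "partial"
--
--
-- def _aggregate_state(sub_states: list[str]) -> str:
--     """Fold the semilattice join over the children's classified states."""
--     if not sub_states:
--         return "empty"
--     acc = _classify(sub_states[0])
--     for s in sub_states[1:]:
--         acc = _join(acc, _classify(s))
--     return acc
-- ===== Notes on version B (the rewrite author's own statement) =====
-- stated objective: alternative
-- what changed: Replaces the three short-circuiting all/any scans with an algebraic fold: each child is classified into a local state and the states are combined with a binary semilattice join (equal states keep their value, differing states yield 'partial').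
import Mathlib
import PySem

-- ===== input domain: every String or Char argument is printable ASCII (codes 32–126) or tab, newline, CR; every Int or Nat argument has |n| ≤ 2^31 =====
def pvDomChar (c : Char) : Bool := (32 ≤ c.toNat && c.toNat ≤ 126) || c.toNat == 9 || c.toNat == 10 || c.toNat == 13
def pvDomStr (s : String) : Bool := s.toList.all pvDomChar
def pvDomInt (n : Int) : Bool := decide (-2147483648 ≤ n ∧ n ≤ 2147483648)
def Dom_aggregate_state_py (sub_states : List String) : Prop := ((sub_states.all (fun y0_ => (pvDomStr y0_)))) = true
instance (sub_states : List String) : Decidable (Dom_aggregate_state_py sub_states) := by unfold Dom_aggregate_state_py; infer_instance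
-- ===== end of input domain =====

-- B replaces A's three all/any scans by an algebraic fold: classify each child, then combine with a binary semilattice join; alternative decomposition, same value everywhere.

-- ===== PORT A =====
def aggregate_state_py (sub_states : List String) : String :=
  if sub_states = [] then "empty"
  else if sub_states.all (fun s => s == "checked") then "checked"
  else if sub_states.any (fun s => s == "checked" || s == "partial") then "partial"
  else "empty"

-- ===== PORT B =====
-- Source B's _classify
def pvClassify (s : String) : String :=
  if s == "checked" || s == "partial" then s else "empty"

-- Source B's _join
def pvJoin (x y : String) : String :=
  if x == y then x else "partial"

def aggregate_state_py_alt (sub_states : List String) : String :=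
  match sub_states with
  | [] => "empty"
  | s :: rest => rest.foldl (fun acc t => pvJoin acc (pvClassify t)) (pvClassify s)

-- ===== PRECONDITION & SPEC =====
def Spec_aggregate_state_py (sub_states : List String) (out : String) : Prop := out = aggregate_state_py_alt sub_states
instance (sub_states : List String) (out : String) : Decidable (Spec_aggregate_state_py sub_states out) := by unfold Spec_aggregate_state_py; infer_instance

-- ===== CLAIM (what is proved, stated in full; the proofs are below) =====
def Claim_equal_aggregate_state_py : Prop := ∀ (sub_states : List String), Dom_aggregate_state_py sub_states → Spec_aggregate_state_py sub_states (aggregate_state_py sub_states)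

-- ===== LEMMAS AND PROOFS =====

theorem classify_cases (s : String) :
    pvClassify s = "checked" ∨ pvClassify s = "partial" ∨ pvClassify s = "empty" := by
  by_cases h : (s == "checked" || s == "partial") = true
  · rcases (by simpa using h : s = "checked" ∨ s = "partial") with h' | h' <;>
      simp [pvClassify, h']
  · rw [Bool.not_eq_true] at h
    simp [pvClassify, h]

-- pointwise: "this child is checked" agrees between the two programs
theorem elem_checked (t : String) : (pvClassify t == "checked") = (t == "checked") := by
  by_cases h1 : t = "checked"
  · simp [pvClassify, h1]
  · by_cases h2 : t = "partial"
    · simp [pvClassify, h2]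
    · have hc : (t == "checked" || t == "partial") = false := by simp [h1, h2]
      simp [pvClassify, hc, h1]

-- pointwise: "this child is active" is the negation of "its class is empty"
theorem elem_active (t : String) :
    (t == "checked" || t == "partial") = !(pvClassify t == "empty") := by
  by_cases h : (t == "checked" || t == "partial") = true
  · rcases (by simpa using h : t = "checked" ∨ t = "partial") with h' | h' <;>
      simp [pvClassify, h']
  · rw [Bool.not_eq_true] at h
    simp [pvClassify, h]

theorem any_active (l : List String) :
    (l.any fun t => t == "checked" || t == "partial")
      = !(l.all fun t => pvClassify t == "empty") := by
  induction l with
  | nil => rfl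
  | cons t rest ih => rw [List.any_cons, List.all_cons, Bool.not_and, ih, elem_active]

theorem join_partial (t : String) : pvJoin "partial" (pvClassify t) = "partial" := by
  rcases classify_cases t with h | h | h <;> simp [pvJoin, h]

-- characterisation of the join-fold starting from an accumulator that is a fixed class
theorem fold_join_char (l : List String) (acc : String)
    (hacc : acc = "checked" ∨ acc = "partial" ∨ acc = "empty") :
    l.foldl (fun a t => pvJoin a (pvClassify t)) acc
      = if acc = "partial" then "partial"
        else if l.all (fun s => pvClassify s == acc) then acc
        else "partial" := by
  induction l generalizing acc with
  | nil => rcases hacc with h | h | h <;> simp [h]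
  | cons s rest ih =>
    simp only [List.foldl_cons, List.all_cons]
    rcases hacc with h | h | h <;> subst h
    · by_cases hs : pvClassify s = "checked"
      · rw [show pvJoin "checked" (pvClassify s) = "checked" by simp [pvJoin, hs]]
        rw [ih "checked" (Or.inl rfl)]
        simp [hs]
      · have hne : ("checked" == pvClassify s) = false := by
          rw [beq_eq_false_iff_ne]; exact fun hh => hs hh.symm
        rw [show pvJoin "checked" (pvClassify s) = "partial" by simp [pvJoin, hne]]
        rw [ih "partial" (Or.inr (Or.inl rfl))]
        simp [hs]
    · rw [join_partial, ih "partial" (Or.inr (Or.inl rfl))]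
      simp
    · by_cases hs : pvClassify s = "empty"
      · rw [show pvJoin "empty" (pvClassify s) = "empty" by simp [pvJoin, hs]]
        rw [ih "empty" (Or.inr (Or.inr rfl))]
        simp [hs]
      · have hne : ("empty" == pvClassify s) = false := by
          rw [beq_eq_false_iff_ne]; exact fun hh => hs hh.symm
        rw [show pvJoin "empty" (pvClassify s) = "partial" by simp [pvJoin, hne]]
        rw [ih "partial" (Or.inr (Or.inl rfl))]
        simp [hs]

-- ===== VERDICT (by name: the statement is the Claim_ definition above) =====
theorem aggregate_state_py_spec : Claim_equal_aggregate_state_py := by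
  intro l _
  unfold Spec_aggregate_state_py aggregate_state_py aggregate_state_py_alt
  match l with
  | [] => simp
  | s :: rest =>
    simp only [reduceCtorEq, if_false]
    rw [fold_join_char rest (pvClassify s) (classify_cases s)]
    rcases classify_cases s with hc | hc | hc <;> rw [hc]
    · -- head is "checked"
      have hs : s = "checked" := by
        have h := elem_checked s
        rw [hc] at h
        simpa using h.symm
      subst hs
      simp only [List.all_cons, beq_self_eq_true, Bool.true_and]
      rw [if_neg (by decide : ¬("checked" : String) = "partial")]
      by_cases hall : (rest.all fun t => pvClassify t == "checked") = true
      · have h2 : (rest.all fun t => t == "checked") = true := by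
          simpa only [elem_checked] using hall
        simp [hall, h2]
      · have h2 : ¬ (rest.all fun t => t == "checked") = true := by
          simpa only [elem_checked] using hall
        simp [hall, h2]
    · -- head is "partial"
      have hs : s = "partial" := by
        by_cases h : (s == "checked" || s == "partial") = true
        · rw [pvClassify, if_pos h] at hc; exact hc
        · rw [Bool.not_eq_true] at h
          simp only [pvClassify, h, Bool.false_eq_true, if_false] at hc
          exact absurd hc (by decide)
      subst hs
      simp
    · -- head classifies to "empty": s is neither "checked" nor "partial"
      have hboth : (s == "checked" || s == "partial") = false := by
        rw [elem_active, hc]; decide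
      rcases Bool.or_eq_false_iff.mp hboth with ⟨h1, h2⟩
      simp only [List.all_cons, List.any_cons, h1, h2, Bool.false_and, Bool.false_or,
        Bool.false_eq_true, if_false]
      rw [if_neg (by decide : ¬("empty" : String) = "partial")]
      rw [any_active]
      by_cases hall : (rest.all fun t => pvClassify t == "empty") = true <;> simp [hall]
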